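-- pv_equiv track=rewrite | github.com/spark900/test_SAP_numbers | __page_comparison.py | find_document_starts
-- ===== SOURCE A (Python) =====
-- def find_document_starts(pages_data: list) -> list:
--    """
--    Identifies the first page of each document based on a change in UID.
--    """
--    if not pages_data:
--        return []
--
--
--    document_start_pages = []
--    for i, current_page in enumerate(pages_data):
--        if i == 0:
--            document_start_pages.append(current_page)
--        elif current_page.get('UID') != pages_data[i - 1].get('UID'):
--            document_start_pages.append(current_page)
--
--    return document_start_pages
-- ===== SOURCE B (Python) =====
-- def find_document_starts(pages_data: list) -> list:
--     """
--     Identifies the first page of each document based on a change in UID.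
--     Run-compression: keep the first page of each consecutive-UID run, then
--     skip the rest of the run; no index arithmetic or i==0 special case.
--     """
--     result = []
--     rest = pages_data
--     while rest:
--         first = rest[0]
--         key = first.get('UID')
--         i = 1
--         while i < len(rest) and rest[i].get('UID') == key:
--             i += 1
--         result.append(first)
--         rest = rest[i:]
--     return result
-- ===== Notes on version B (the rewrite author's own statement) =====
-- stated objective: alternative
-- what changed: Replaces the enumerate loop with its i==0 special case and pages_data[i-1] back-indexing by a run-compression scan: keep the head of each consecutive-UID run and skip the rest of the run.
import Mathlib
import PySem

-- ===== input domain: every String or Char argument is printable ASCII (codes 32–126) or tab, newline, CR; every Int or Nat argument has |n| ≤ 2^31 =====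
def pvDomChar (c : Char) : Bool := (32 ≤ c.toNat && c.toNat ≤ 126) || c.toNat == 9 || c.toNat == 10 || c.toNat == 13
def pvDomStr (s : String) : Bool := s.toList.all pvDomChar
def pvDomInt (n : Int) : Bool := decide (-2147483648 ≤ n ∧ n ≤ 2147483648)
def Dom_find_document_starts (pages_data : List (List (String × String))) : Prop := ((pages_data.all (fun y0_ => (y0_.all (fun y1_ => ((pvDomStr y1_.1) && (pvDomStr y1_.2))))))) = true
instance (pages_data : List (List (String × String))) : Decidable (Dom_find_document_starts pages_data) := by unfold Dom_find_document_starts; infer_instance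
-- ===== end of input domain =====

-- B keeps the head of each consecutive-UID run instead of A's enumerate loop with back-indexing; same results, proved equal on all inputs.

-- shared accessor: page.get('UID')  (assoc-list dict, first match)
def pvGetUID (p : List (String × String)) : Option String := (PySem.Dict.mk p).get? "UID"

-- ===== PORT A =====
-- pages_data[i-1]: i ≥ 1 in that branch, so the index is always in range; pyGetD's default is never used.
def find_document_starts (pages_data : List (List (String × String))) : List (List (String × String)) :=
  if pages_data = [] then []
  else
    (PySem.List.enumerate pages_data 0).foldl
      (fun acc x =>
        if x.1 = 0 then acc ++ [x.2]
        else if pvGetUID x.2 ≠ pvGetUID (PySem.List.pyGetD pages_data (x.1 - 1) []) then acc ++ [x.2]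
        else acc) []

-- ===== PORT B =====
def find_document_starts_alt (pages_data : List (List (String × String))) : List (List (String × String)) :=
  match pages_data with
  | [] => []
  | p :: rest =>
    p :: find_document_starts_alt (rest.dropWhile (fun q => pvGetUID q == pvGetUID p))
termination_by pages_data.length
decreasing_by
  have := List.length_dropWhile_le (fun q => pvGetUID q == pvGetUID p) rest
  simp; omega

-- ===== PRECONDITION & SPEC =====
def Spec_find_document_starts (pages_data : List (List (String × String))) (out : List (List (String × String))) : Prop := out = find_document_starts_alt pages_data
instance (pages_data : List (List (String × String))) (out : List (List (String × String))) : Decidable (Spec_find_document_starts pages_data out) := by unfold Spec_find_document_starts; infer_instance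

-- ===== CLAIM (what is proved, stated in full; the proofs are below) =====
def Claim_equal_find_document_starts : Prop := ∀ (pages_data : List (List (String × String))), Dom_find_document_starts pages_data → Spec_find_document_starts pages_data (find_document_starts pages_data)

-- ===== LEMMAS AND PROOFS =====

-- proof helper: the pages A appends after the first, given the previous page
def pvAdjKeep (prev : List (String × String)) : List (List (String × String)) → List (List (String × String))
  | [] => []
  | c :: cs => if pvGetUID c = pvGetUID prev then pvAdjKeep c cs else c :: pvAdjKeep c cs

lemma pvAdjKeep_congr (a b : List (String × String)) (h : pvGetUID a = pvGetUID b)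
    (l : List (List (String × String))) : pvAdjKeep a l = pvAdjKeep b l := by
  cases l with
  | nil => rfl
  | cons c cs => simp [pvAdjKeep, h]

lemma pv_fold_suffix (suffix : List (List (String × String))) :
    ∀ (pages_data : List (List (String × String))) (i0 : Nat) (prev : List (String × String))
      (acc : List (List (String × String))),
    1 ≤ i0 → pages_data.drop i0 = suffix →
    PySem.List.pyGetD pages_data ((i0 : Int) - 1) [] = prev →
    (PySem.List.enumerate suffix (i0 : Int)).foldl
      (fun acc x =>
        if x.1 = 0 then acc ++ [x.2]
        else if pvGetUID x.2 ≠ pvGetUID (PySem.List.pyGetD pages_data (x.1 - 1) []) then acc ++ [x.2]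
        else acc) acc
    = acc ++ pvAdjKeep prev suffix := by
  induction suffix with
  | nil => intro pd i0 prev acc _ _ _; simp [pvAdjKeep]
  | cons c cs ih =>
    intro pd i0 prev acc h1 hdrop hprev
    have hi0 : ((i0 : Int)) ≠ 0 := by positivity
    have hc : PySem.List.pyGetD pd (((i0 + 1 : Nat) : Int) - 1) [] = c := by
      have : pd[i0]? = some c := by
        have h : (pd.drop i0)[0]? = some c := by rw [hdrop]; rfl
        simpa [List.getElem?_drop] using h
      have h0 : ((i0 + 1 : Nat) : Int) - 1 = ((i0 : Nat) : Int) := by push_cast; ring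
      rw [h0, PySem.List.pyGetD_natCast]
      simp [List.getD, this]
    have hdrop' : pd.drop (i0 + 1) = cs := by
      rw [← List.drop_drop]  -- drop 1 (drop i0 pd)
      simp [hdrop]
    rw [PySem.List.enumerate_cons, List.foldl_cons]
    simp only [if_neg hi0]
    by_cases hk : pvGetUID c = pvGetUID prev
    · have hcond : ¬ pvGetUID c ≠ pvGetUID (PySem.List.pyGetD pd ((i0 : Int) - 1) []) := by
        rw [hprev]; simpa using hk
      rw [if_neg hcond]
      have hih := ih pd (i0 + 1) c acc (by omega) hdrop' hc
      rw [show ((i0 : Int) + 1) = ((i0 + 1 : Nat) : Int) by push_cast; ring, hih]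
      simp [pvAdjKeep, hk]
    · have hcond : pvGetUID c ≠ pvGetUID (PySem.List.pyGetD pd ((i0 : Int) - 1) []) := by
        rw [hprev]; exact hk
      rw [if_pos hcond]
      have hih := ih pd (i0 + 1) c (acc ++ [c]) (by omega) hdrop' hc
      rw [show ((i0 : Int) + 1) = ((i0 + 1 : Nat) : Int) by push_cast; ring, hih]
      simp [pvAdjKeep, hk]

lemma pv_alt_adjKeep (l : List (List (String × String))) :
    ∀ prev, find_document_starts_alt (l.dropWhile (fun q => pvGetUID q == pvGetUID prev))
      = pvAdjKeep prev l := by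
  induction l with
  | nil => intro prev; simp [find_document_starts_alt, pvAdjKeep]
  | cons c cs ih =>
    intro prev
    by_cases h : pvGetUID c = pvGetUID prev
    · rw [List.dropWhile_cons_of_pos (by simpa using h)]
      rw [ih prev]
      simp [pvAdjKeep, h, pvAdjKeep_congr c prev h]
    · rw [List.dropWhile_cons_of_neg (by simpa using h)]
      rw [find_document_starts_alt, ih c]
      simp [pvAdjKeep, h]

-- ===== VERDICT (by name: the statement is the Claim_ definition above) =====
theorem find_document_starts_spec : Claim_equal_find_document_starts := by
  intro pd _
  unfold Spec_find_document_starts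
  cases pd with
  | nil => simp [find_document_starts, find_document_starts_alt]
  | cons p rest =>
    rw [find_document_starts, if_neg (by simp)]
    rw [PySem.List.enumerate_cons, List.foldl_cons]
    simp only [reduceIte, List.nil_append]
    have h0 : (0 : Int) + 1 = ((1 : Nat) : Int) := by norm_num
    rw [h0, pv_fold_suffix rest (p :: rest) 1 p [p] (by omega) (by simp)
      (by norm_num [PySem.List.pyGetD])]
    rw [find_document_starts_alt, pv_alt_adjKeep rest p]
    simp
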